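-- pv_equiv track=rewrite | github.com/joshanashakya/dissertation | workspace/dataset/java-python/GeeksForGeeks/656/A/2.py | maxSum2
-- ===== SOURCE A (Python) =====
-- def maxSum2(arr, n):
--
--     dp = [0] * n
--     maxi = 0
--
--     for i in range(1, n):
--         dp[i] = arr[i]
--
--         if (maxi < arr[i]):
--             maxi = arr[i]
--
--     # Traverse from third to n-th pos
--     for i in range(3, n):
--
--         # bootom-up approach
--         for j in range(1, i - 1) :
--
--             # dp condition
--             if (dp[i] < arr[i] + dp[j]):
--                 dp[i] = arr[i] + dp[j]
--
--                 # find max sum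
--                 if (maxi < dp[i]):
--                     maxi = dp[i]
--
--     # return max
--     return maxi
-- ===== SOURCE B (Python) =====
-- def maxSum2(arr, n):
--     # O(n) one-pass DP: keep running prefix-maxima of dp values lagging by
--     # one and two positions instead of rescanning all earlier dp entries.
--     maxi = 0
--     best2 = 0   # max(0, dp[1..i-2])
--     best1 = 0   # max(0, dp[1..i-1])
--     for i in range(1, n):
--         cur = arr[i] + best2
--         if cur > maxi:
--             maxi = cur
--         best2 = best1
--         if cur > best1:
--             best1 = cur
--     return maxi
-- ===== Notes on version B (the rewrite author's own statement) =====
-- stated objective: faster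
-- what changed: replaces the quadratic rescan of all earlier dp values by a single pass that maintains two running prefix-maxima (dp up to i-1 and up to i-2), so no dp array is kept at all
import Mathlib
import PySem

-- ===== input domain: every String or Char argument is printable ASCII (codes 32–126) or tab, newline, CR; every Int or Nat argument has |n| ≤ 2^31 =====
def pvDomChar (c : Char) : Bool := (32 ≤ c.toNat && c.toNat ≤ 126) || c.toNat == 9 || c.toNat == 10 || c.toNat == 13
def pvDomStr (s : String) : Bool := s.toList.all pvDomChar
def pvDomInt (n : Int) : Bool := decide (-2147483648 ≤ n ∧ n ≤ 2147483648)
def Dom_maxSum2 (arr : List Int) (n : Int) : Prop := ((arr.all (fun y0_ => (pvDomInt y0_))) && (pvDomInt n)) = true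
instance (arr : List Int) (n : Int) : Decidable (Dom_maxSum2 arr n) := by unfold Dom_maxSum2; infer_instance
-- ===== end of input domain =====

-- B replaces A's quadratic inner rescan of dp by a single pass keeping two running
-- prefix-maxima, so no dp array is needed (objective: faster, O(n) vs O(n^2)).

-- ===== PORT A =====
-- first loop body: dp[i] = arr[i]; if maxi < arr[i]: maxi = arr[i]
def pvStep1 (arr : List Int) (st : List Int × Int) (i : Int) : List Int × Int :=
  let ai := PySem.List.pyGetD arr i 0
  (PySem.List.pySetD st.1 i ai, if st.2 < ai then ai else st.2)

-- inner loop body: if dp[i] < arr[i] + dp[j]: dp[i] = arr[i] + dp[j]; if maxi < dp[i]: maxi = dp[i]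
def pvStepJ (arr : List Int) (i : Int) (st : List Int × Int) (j : Int) : List Int × Int :=
  let cand := PySem.List.pyGetD arr i 0 + PySem.List.pyGetD st.1 j 0
  if PySem.List.pyGetD st.1 i 0 < cand then
    (PySem.List.pySetD st.1 i cand, if st.2 < cand then cand else st.2)
  else st

-- outer loop body: for j in range(1, i - 1): ...
def pvStepI (arr : List Int) (st : List Int × Int) (i : Int) : List Int × Int :=
  (PySem.List.pyRange 1 (i - 1) 1).foldl (pvStepJ arr i) st

def maxSum2 (arr : List Int) (n : Int) : Int :=
  let s1 := (PySem.List.pyRange 1 n 1).foldl (pvStep1 arr) (List.replicate n.toNat 0, 0)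
  ((PySem.List.pyRange 3 n 1).foldl (pvStepI arr) s1).2

-- ===== PORT B =====
-- loop body: cur = arr[i] + best2; maxi/best2/best1 updates (state = (maxi, best2, best1))
def pvStepB (arr : List Int) (st : Int × Int × Int) (i : Int) : Int × Int × Int :=
  let cur := PySem.List.pyGetD arr i 0 + st.2.1
  (if cur > st.1 then cur else st.1, st.2.2, if cur > st.2.2 then cur else st.2.2)

def maxSum2_alt (arr : List Int) (n : Int) : Int :=
  ((PySem.List.pyRange 1 n 1).foldl (pvStepB arr) (0, 0, 0)).1

-- ===== PRECONDITION & SPEC =====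
-- Pre_ excludes exactly the inputs where the Python A raises IndexError:
-- reading arr[i] for i in range(1, n) needs n ≤ len(arr) (unless the loop is empty, n ≤ 1).
def Pre_maxSum2 (arr : List Int) (n : Int) : Prop := n ≤ (arr.length : Int) ∨ n ≤ 1
instance (arr : List Int) (n : Int) : Decidable (Pre_maxSum2 arr n) := by unfold Pre_maxSum2; infer_instance
def pvWitness_maxSum2 : List Int × Int := ([3, 2, 7, 10], 4)

def Spec_maxSum2 (arr : List Int) (n : Int) (out : Int) : Prop := out = maxSum2_alt arr n
instance (arr : List Int) (n : Int) (out : Int) : Decidable (Spec_maxSum2 arr n out) := by unfold Spec_maxSum2; infer_instance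

-- ===== CLAIM (what is proved, stated in full; the proofs are below) =====
def Claim_equal_maxSum2 : Prop := ∀ (arr : List Int) (n : Int), Dom_maxSum2 arr n → Pre_maxSum2 arr n → Spec_maxSum2 arr n (maxSum2 arr n)

-- ===== LEMMAS AND PROOFS =====

-- abbreviations used only by the proofs
def pvA (arr : List Int) (j : Int) : Int := PySem.List.pyGetD arr j 0

def pvFMax (g : Int → Int) (l : List Int) (x : Int) : Int :=
  l.foldl (fun x j => max x (g j)) x

def pvDMax (dp : List Int) (lo hi : Int) : Int :=
  pvFMax (fun j => PySem.List.pyGetD dp j 0) (PySem.List.pyRange lo hi 1) 0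

def pvAltSt (arr : List Int) (m : Int) : Int × Int × Int :=
  (PySem.List.pyRange 1 m 1).foldl (pvStepB arr) (0, 0, 0)

lemma pvIfMax (m x : Int) : (if m < x then x else m) = max m x := by
  rw [max_def]; split_ifs <;> omega

lemma pvIfMax' (m x : Int) : (if x > m then x else m) = max m x := by
  rw [max_def]; split_ifs <;> omega

lemma pvStep1_eq (arr : List Int) (st : List Int × Int) (i : Int) :
    pvStep1 arr st i = (PySem.List.pySetD st.1 i (pvA arr i), max st.2 (pvA arr i)) := by
  simp [pvStep1, pvA, pvIfMax]

lemma pvStepB_eq (arr : List Int) (st : Int × Int × Int) (i : Int) :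
    pvStepB arr st i = (max st.1 (pvA arr i + st.2.1), st.2.2, max st.2.2 (pvA arr i + st.2.1)) := by
  simp [pvStepB, pvA, pvIfMax']

lemma pvFMax_nil (g : Int → Int) (x : Int) : pvFMax g [] x = x := rfl

lemma pvFMax_cons (g : Int → Int) (j : Int) (l : List Int) (x : Int) :
    pvFMax g (j :: l) x = pvFMax g l (max x (g j)) := rfl

lemma pvFMax_append (g : Int → Int) (l1 l2 : List Int) (x : Int) :
    pvFMax g (l1 ++ l2) x = pvFMax g l2 (pvFMax g l1 x) := by
  simp [pvFMax]

lemma pvLeFMax (g : Int → Int) (l : List Int) (x : Int) : x ≤ pvFMax g l x := by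
  induction l generalizing x with
  | nil => simp [pvFMax_nil]
  | cons j l ih =>
      rw [pvFMax_cons]
      exact le_trans (le_max_left _ _) (ih _)

lemma pvMaxFMax (g : Int → Int) (l : List Int) (x z : Int) :
    max (pvFMax g l x) z = pvFMax g l (max x z) := by
  induction l generalizing x with
  | nil => simp [pvFMax_nil]
  | cons j l ih =>
      rw [pvFMax_cons, pvFMax_cons, ih, max_right_comm]

lemma pvFMax_congr (g g' : Int → Int) (l : List Int) (x : Int)
    (h : ∀ j ∈ l, g j = g' j) : pvFMax g l x = pvFMax g' l x := by
  induction l generalizing x with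
  | nil => rfl
  | cons j l ih =>
      rw [pvFMax_cons, pvFMax_cons, h j (by simp)]
      exact ih _ (fun j hj => h j (by simp [hj]))

lemma pvFMax_add (c : Int) (g : Int → Int) (l : List Int) (x : Int) :
    pvFMax (fun j => c + g j) l (c + x) = c + pvFMax g l x := by
  induction l generalizing x with
  | nil => rfl
  | cons j l ih =>
      rw [pvFMax_cons, pvFMax_cons, max_add_add_left, ih]

-- indexing helpers (Int indices)
lemma pvGetHigh (xs : List Int) (i d : Int) (h : (xs.length : Int) ≤ i) :
    PySem.List.pyGetD xs i d = d := by
  have h0 : 0 ≤ i := le_trans (by positivity) h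
  rw [PySem.List.pyGetD, PySem.List.pyGet?]
  simp [PySem.List.pyIdx?, h0, not_lt.mpr h]

lemma pvGetSetSelf (xs : List Int) (i v : Int) (h0 : 0 ≤ i) (h : i < (xs.length : Int)) :
    PySem.List.pyGetD (PySem.List.pySetD xs i v) i 0 = v := by
  rw [PySem.List.pySetD_of_nonneg xs v h0,
    PySem.List.pyGetD_eq_getElem _ _ h0 (by simpa using h)]
  rw [List.getElem_set_self]

lemma pvGetSetNe (xs : List Int) (i j v : Int) (h0 : 0 ≤ i) (hj : 0 ≤ j) (hne : j ≠ i) :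
    PySem.List.pyGetD (PySem.List.pySetD xs i v) j 0 = PySem.List.pyGetD xs j 0 := by
  rw [PySem.List.pySetD_of_nonneg xs v h0]
  rcases lt_or_ge j (xs.length : Int) with hlt | hge
  · rw [PySem.List.pyGetD_eq_getElem _ _ hj (by simpa using hlt),
      PySem.List.pyGetD_eq_getElem _ _ hj hlt]
    exact List.getElem_set_ne (show i.toNat ≠ j.toNat by omega) _
  · rw [pvGetHigh _ _ _ (by simpa using hge), pvGetHigh _ _ _ hge]

lemma pvSetSet (xs : List Int) (i v w : Int) (h0 : 0 ≤ i) :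
    PySem.List.pySetD (PySem.List.pySetD xs i v) i w = PySem.List.pySetD xs i w := by
  rw [PySem.List.pySetD_of_nonneg xs v h0, PySem.List.pySetD_of_nonneg _ w h0,
    PySem.List.pySetD_of_nonneg xs w h0, List.set_set]

lemma pvSetSelfEq (xs : List Int) (i v : Int) (h0 : 0 ≤ i)
    (hv : PySem.List.pyGetD xs i 0 = v) : PySem.List.pySetD xs i v = xs := by
  rw [PySem.List.pySetD_of_nonneg xs v h0]
  rcases lt_or_ge i (xs.length : Int) with hlt | hge
  · rw [PySem.List.pyGetD_eq_getElem _ _ h0 hlt] at hv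
    rw [← hv]
    apply List.set_getElem_self
  · exact List.set_eq_of_length_le (by omega)

-- first loop of A: dp[k] = arr[k] for k in [t, n), other entries untouched, maxi = running max
lemma pvL1 (arr : List Int) (n : Int) : ∀ (fuel : Nat) (t : Int) (dp : List Int) (m : Int),
    (n - t).toNat ≤ fuel → 0 ≤ t → n ≤ (dp.length : Int) →
    (((PySem.List.pyRange t n 1).foldl (pvStep1 arr) (dp, m)).1.length = dp.length) ∧
    (∀ k : Int, 0 ≤ k → (k < t ∨ n ≤ k) →
      PySem.List.pyGetD ((PySem.List.pyRange t n 1).foldl (pvStep1 arr) (dp, m)).1 k 0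
        = PySem.List.pyGetD dp k 0) ∧
    (∀ k : Int, t ≤ k → k < n →
      PySem.List.pyGetD ((PySem.List.pyRange t n 1).foldl (pvStep1 arr) (dp, m)).1 k 0 = pvA arr k) ∧
    ((PySem.List.pyRange t n 1).foldl (pvStep1 arr) (dp, m)).2
        = pvFMax (pvA arr) (PySem.List.pyRange t n 1) m := by
  intro fuel
  induction fuel with
  | zero =>
      intro t dp m hf ht hlen
      have hnt : n ≤ t := by omega
      rw [PySem.List.pyRange_one_eq_nil hnt]
      refine ⟨rfl, fun k _ _ => rfl, fun k hk1 hk2 => absurd (lt_of_le_of_lt hk1 hk2) (by omega), rfl⟩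
  | succ f ih =>
      intro t dp m hf ht hlen
      rcases lt_or_ge t n with htn | hnt
      case inr =>
        rw [PySem.List.pyRange_one_eq_nil hnt]
        exact ⟨rfl, fun k _ _ => rfl, fun k hk1 hk2 => absurd (lt_of_le_of_lt hk1 hk2) (by omega), rfl⟩
      case inl =>
        rw [PySem.List.pyRange_one_cons htn, List.foldl_cons, pvStep1_eq]
        obtain ⟨h1, h2, h3, h4⟩ := ih (t + 1) (PySem.List.pySetD dp t (pvA arr t)) (max m (pvA arr t))
          (by omega) (by omega) (by rw [PySem.List.length_pySetD]; exact hlen)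
        refine ⟨by rw [h1, PySem.List.length_pySetD], ?_, ?_, ?_⟩
        · intro k hk0 hk
          rw [h2 k hk0 (by omega), pvGetSetNe dp t k _ ht hk0 (by omega)]
        · intro k hk1 hk2
          rcases eq_or_lt_of_le hk1 with hkt | hkt
          · rw [h2 k (by omega) (by omega), ← hkt,
              pvGetSetSelf dp t _ ht (by omega)]
          · exact h3 k (by omega) hk2
        · rw [h4, pvFMax_cons]

-- inner loop of A at position i: dp[i] becomes the running max of arr[i] + dp[j],
-- maxi becomes max maxi (that value)
lemma pvL2 (arr : List Int) (i : Int) : ∀ (fuel : Nat) (t : Int) (dp : List Int) (m c : Int),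
    ((i - 1) - t).toNat ≤ fuel → 0 ≤ t → 0 ≤ i → i < (dp.length : Int) →
    PySem.List.pyGetD dp i 0 = c → c ≤ m →
    (PySem.List.pyRange t (i - 1) 1).foldl (pvStepJ arr i) (dp, m)
      = (PySem.List.pySetD dp i
           (pvFMax (fun j => pvA arr i + PySem.List.pyGetD dp j 0) (PySem.List.pyRange t (i - 1) 1) c),
         max m (pvFMax (fun j => pvA arr i + PySem.List.pyGetD dp j 0) (PySem.List.pyRange t (i - 1) 1) c)) := by
  intro fuel
  induction fuel with
  | zero =>
      intro t dp m c hf ht hi hilen hc hcm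
      have hnt : i - 1 ≤ t := by omega
      rw [PySem.List.pyRange_one_eq_nil hnt, pvFMax_nil]
      simp [List.foldl_nil, pvSetSelfEq dp i c hi hc, max_eq_left hcm]
  | succ f ih =>
      intro t dp m c hf ht hi hilen hc hcm
      rcases lt_or_ge t (i - 1) with htn | hnt
      case inr =>
        rw [PySem.List.pyRange_one_eq_nil hnt, pvFMax_nil]
        simp [List.foldl_nil, pvSetSelfEq dp i c hi hc, max_eq_left hcm]
      case inl =>
        rw [PySem.List.pyRange_one_cons htn, List.foldl_cons]
        have hcand : pvStepJ arr i (dp, m) t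
            = if c < pvA arr i + PySem.List.pyGetD dp t 0 then
                (PySem.List.pySetD dp i (pvA arr i + PySem.List.pyGetD dp t 0),
                 max m (pvA arr i + PySem.List.pyGetD dp t 0))
              else (dp, m) := by
          simp only [pvStepJ, pvA, hc, pvIfMax]
        rw [hcand, pvFMax_cons]
        set cand := pvA arr i + PySem.List.pyGetD dp t 0 with hcanddef
        by_cases himp : c < cand
        · rw [if_pos himp]
          have hgetself : PySem.List.pyGetD (PySem.List.pySetD dp i cand) i 0 = cand :=
            pvGetSetSelf dp i cand hi hilen
          rw [ih (t + 1) (PySem.List.pySetD dp i cand) (max m cand) cand (by omega) (by omega) hi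
            (by rw [PySem.List.length_pySetD]; exact hilen) hgetself (le_max_right _ _)]
          have hcongr : pvFMax (fun j => pvA arr i + PySem.List.pyGetD (PySem.List.pySetD dp i cand) j 0)
              (PySem.List.pyRange (t + 1) (i - 1) 1) cand
            = pvFMax (fun j => pvA arr i + PySem.List.pyGetD dp j 0)
              (PySem.List.pyRange (t + 1) (i - 1) 1) cand := by
            refine pvFMax_congr _ _ _ _ (fun j hj => ?_)
            rw [PySem.List.mem_pyRange_one] at hj
            rw [pvGetSetNe dp i j cand hi (by omega) (by omega)]
          rw [hcongr, max_eq_right (le_of_lt himp), pvSetSet dp i _ _ hi]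
          have hle : cand ≤ pvFMax (fun j => pvA arr i + PySem.List.pyGetD dp j 0)
              (PySem.List.pyRange (t + 1) (i - 1) 1) cand := pvLeFMax _ _ _
          rw [max_assoc, max_eq_right hle]
        · rw [if_neg himp]
          have hcc : max c cand = c := max_eq_left (by omega)
          rw [ih (t + 1) dp m c (by omega) (by omega) hi hilen hc hcm, hcc]

-- outer loop of A kept in lockstep with B's single pass
lemma pvL3 (arr : List Int) (n : Int) : ∀ (fuel : Nat) (m : Int) (dp : List Int) (maxi : Int),
    (n - m).toNat ≤ fuel → 3 ≤ m → m ≤ n → n ≤ (dp.length : Int) →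
    (∀ k : Int, m ≤ k → k < n → PySem.List.pyGetD dp k 0 = pvA arr k) →
    pvDMax dp 1 (m - 1) = (pvAltSt arr m).2.1 →
    pvDMax dp 1 m = (pvAltSt arr m).2.2 →
    maxi = pvFMax (pvA arr) (PySem.List.pyRange m n 1) (pvAltSt arr m).1 →
    ((PySem.List.pyRange m n 1).foldl (pvStepI arr) (dp, maxi)).2 = (pvAltSt arr n).1 := by
  intro fuel
  induction fuel with
  | zero =>
      intro m dp maxi hf h3 hmn hlen hent hb2 hb1 hmaxi
      have hm : m = n := by omega
      subst hm
      rw [PySem.List.pyRange_one_eq_nil le_rfl] at hmaxi ⊢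
      simpa [pvFMax_nil] using hmaxi
  | succ f ih =>
      intro m dp maxi hf h3 hmn hlen hent hb2 hb1 hmaxi
      rcases eq_or_lt_of_le hmn with hm | hmlt
      · subst hm
        rw [PySem.List.pyRange_one_eq_nil le_rfl] at hmaxi ⊢
        simpa [pvFMax_nil] using hmaxi
      · rw [PySem.List.pyRange_one_cons hmlt, List.foldl_cons]
        -- the inner loop at i = m
        have hdm : PySem.List.pyGetD dp m 0 = pvA arr m := hent m le_rfl hmlt
        have hb2nonneg : (0:Int) ≤ (pvAltSt arr m).2.1 := hb2 ▸ pvLeFMax _ _ _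
        set cur := pvA arr m + (pvAltSt arr m).2.1 with hcurdef
        have hamcur : pvA arr m ≤ cur := by omega
        have hmaxge : pvA arr m ≤ maxi := by
          rw [hmaxi, PySem.List.pyRange_one_cons hmlt, pvFMax_cons]
          exact le_trans (le_max_right _ _) (pvLeFMax _ _ _)
        have hstep : pvStepI arr (dp, maxi) m
            = (PySem.List.pySetD dp m cur, max maxi cur) := by
          rw [pvStepI, pvL2 arr m ((m - 1) - 1).toNat 1 dp maxi (pvA arr m) le_rfl (by omega)
            (by omega) (by omega) hdm hmaxge]
          have : pvFMax (fun j => pvA arr m + PySem.List.pyGetD dp j 0)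
              (PySem.List.pyRange 1 (m - 1) 1) (pvA arr m) = cur := by
            have h0 := pvFMax_add (pvA arr m) (fun j => PySem.List.pyGetD dp j 0)
              (PySem.List.pyRange 1 (m - 1) 1) 0
            rw [add_zero] at h0
            rw [h0, hcurdef, ← hb2, pvDMax]
          rw [this]
        rw [hstep]
        -- B's step at i = m
        have haltsucc : pvAltSt arr (m + 1)
            = (max (pvAltSt arr m).1 cur, (pvAltSt arr m).2.2, max (pvAltSt arr m).2.2 cur) := by
          rw [pvAltSt, PySem.List.pyRange_one_succ_right (by omega), List.foldl_append,
            List.foldl_cons, List.foldl_nil, pvStepB_eq]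
          rfl
        have hlen' : n ≤ ((PySem.List.pySetD dp m cur).length : Int) := by
          rw [PySem.List.length_pySetD]; exact hlen
        have h1m : (1:Int) ≤ m := by omega
        refine ih (m + 1) (PySem.List.pySetD dp m cur) (max maxi cur) (by omega) (by omega)
          (by omega) hlen' ?_ ?_ ?_ ?_
        · intro k hk1 hk2
          rw [pvGetSetNe dp m k cur (by omega) (by omega) (by omega)]
          exact hent k (by omega) hk2
        · -- dMax up to (m+1)-1 = m : entries below m are unchanged
          have : pvDMax (PySem.List.pySetD dp m cur) 1 (m + 1 - 1) = pvDMax dp 1 m := by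
            have hm1 : m + 1 - 1 = m := by ring
            rw [hm1, pvDMax, pvDMax]
            refine pvFMax_congr _ _ _ _ (fun j hj => ?_)
            rw [PySem.List.mem_pyRange_one] at hj
            rw [pvGetSetNe dp m j cur (by omega) (by omega) (by omega)]
          rw [this, hb1, haltsucc]
        · -- dMax up to m+1 picks up the new dp[m] = cur
          rw [pvDMax, PySem.List.pyRange_one_succ_right h1m, pvFMax_append, pvFMax_cons, pvFMax_nil]
          have hcongr : pvFMax (fun j => PySem.List.pyGetD (PySem.List.pySetD dp m cur) j 0)
              (PySem.List.pyRange 1 m 1) 0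
            = pvDMax dp 1 m := by
            rw [pvDMax]
            refine pvFMax_congr _ _ _ _ (fun j hj => ?_)
            rw [PySem.List.mem_pyRange_one] at hj
            rw [pvGetSetNe dp m j cur (by omega) (by omega) (by omega)]
          rw [hcongr, hb1, pvGetSetSelf dp m cur (by omega) (by omega), haltsucc]
        · -- the running maxi stays the prefix-max of B's maxi over the a-values not yet final
          rw [hmaxi, PySem.List.pyRange_one_cons hmlt, pvFMax_cons, pvMaxFMax, haltsucc]
          congr 1
          rw [max_right_comm]
          exact max_eq_left (le_trans hamcur (le_max_right _ _))

-- small-n values of B's fold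
lemma pvRange12 : PySem.List.pyRange 1 2 1 = [1] := by
  rw [PySem.List.pyRange_one_cons (by norm_num), show (1:Int) + 1 = 2 by norm_num,
    PySem.List.pyRange_one_eq_nil le_rfl]

lemma pvRange13 : PySem.List.pyRange 1 3 1 = [1, 2] := by
  rw [PySem.List.pyRange_one_cons (by norm_num), show (1:Int) + 1 = 2 by norm_num,
    PySem.List.pyRange_one_cons (by norm_num), show (2:Int) + 1 = 3 by norm_num,
    PySem.List.pyRange_one_eq_nil le_rfl]

lemma pvAlt2 (arr : List Int) : (pvAltSt arr 2).1 = max 0 (pvA arr 1) := by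
  simp [pvAltSt, pvRange12, pvStepB_eq]

lemma pvAlt3 (arr : List Int) :
    pvAltSt arr 3 = (max (max 0 (pvA arr 1)) (pvA arr 2), max 0 (pvA arr 1),
      max (max 0 (pvA arr 1)) (pvA arr 2)) := by
  simp [pvAltSt, pvRange13, pvStepB_eq]

-- ===== VERDICT (by name: the statement is the Claim_ definition above) =====
theorem maxSum2_spec : Claim_equal_maxSum2 := by
  intro arr n _ _
  unfold Spec_maxSum2
  show maxSum2 arr n = maxSum2_alt arr n
  rcases lt_or_ge 1 n with hn1 | hn1
  case inr =>
    unfold maxSum2 maxSum2_alt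
    rw [PySem.List.pyRange_one_eq_nil hn1, PySem.List.pyRange_one_eq_nil (by omega : n ≤ 3)]
    rfl
  case inl =>
    -- n ≥ 2 : characterise the first loop
    have hlen : n ≤ ((List.replicate n.toNat (0:Int)).length : Int) := by
      rw [List.length_replicate]; omega
    obtain ⟨h1, h2, h3, h4⟩ := pvL1 arr n (n - 1).toNat 1 (List.replicate n.toNat 0) 0
      le_rfl (by omega) hlen
    set s1 := (PySem.List.pyRange 1 n 1).foldl (pvStep1 arr) (List.replicate n.toNat 0, 0) with hs1
    have hB : maxSum2_alt arr n = (pvAltSt arr n).1 := rfl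
    have hA : maxSum2 arr n = ((PySem.List.pyRange 3 n 1).foldl (pvStepI arr) s1).2 := rfl
    rcases lt_or_ge 2 n with hn2 | hn2
    case inr =>
      -- n = 2
      have hn : n = 2 := by omega
      subst hn
      rw [hA, hB, PySem.List.pyRange_one_eq_nil (by omega : (2:Int) ≤ 3), List.foldl_nil,
        h4, pvAlt2, pvRange12, pvFMax_cons, pvFMax_nil]
    case inl =>
      -- n ≥ 3 : run the outer loop in lockstep with B
      rw [hA, hB, (show s1 = (s1.1, s1.2) from rfl)]
      refine pvL3 arr n (n - 3).toNat 3 s1.1 s1.2 le_rfl le_rfl (by omega)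
        (by rw [h1]; exact hlen) ?_ ?_ ?_ ?_
      · intro k hk1 hk2
        exact h3 k (by omega) hk2
      · rw [pvDMax, show (3:Int) - 1 = 2 by norm_num, pvRange12, pvFMax_cons, pvFMax_nil,
          pvAlt3, h3 1 le_rfl (by omega)]
      · rw [pvDMax, pvRange13, pvFMax_cons, pvFMax_cons, pvFMax_nil, pvAlt3,
          h3 1 le_rfl (by omega), h3 2 (by omega) (by omega)]
      · rw [h4, PySem.List.pyRange_one_append 1 3 n (by omega) (by omega), pvFMax_append,
          pvAlt3, pvRange13, pvFMax_cons, pvFMax_cons, pvFMax_nil]
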